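-- pv_equiv track=rewrite | github.com/23adrian2300/WDI-AGH | Zestaw 3/Zestaw 3.py | has_one_smallest_and_one_largest
-- ===== SOURCE A (Python) =====
-- def has_one_smallest_and_one_largest(t):
--     min_count = 0
--     max_count = 0
--     min = t[0]
--     max = t[0]
--     for num in t:
--         if num < min:
--             min = num
--             min_count = 1
--         elif num == min:
--             min_count += 1
--         if num > max:
--             max = num
--             max_count = 1
--         elif num == max:
--             max_count += 1
--
--     return min_count == 1 and max_count == 1
-- ===== SOURCE B (Python) =====
-- def has_one_smallest_and_one_largest(t):
--     mn = min(t)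
--     mx = max(t)
--     return t.count(mn) == 1 and t.count(mx) == 1
-- ===== Notes on version B (the rewrite author's own statement) =====
-- stated objective: simpler
-- what changed: Replaces the fused single-pass running min/max/count state machine with separate min(t), max(t) and count passes and no mutable state.
-- outside the precondition, e.g. on has_one_smallest_and_one_largest([]): A raises IndexError, B raises ValueError
import Mathlib
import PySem

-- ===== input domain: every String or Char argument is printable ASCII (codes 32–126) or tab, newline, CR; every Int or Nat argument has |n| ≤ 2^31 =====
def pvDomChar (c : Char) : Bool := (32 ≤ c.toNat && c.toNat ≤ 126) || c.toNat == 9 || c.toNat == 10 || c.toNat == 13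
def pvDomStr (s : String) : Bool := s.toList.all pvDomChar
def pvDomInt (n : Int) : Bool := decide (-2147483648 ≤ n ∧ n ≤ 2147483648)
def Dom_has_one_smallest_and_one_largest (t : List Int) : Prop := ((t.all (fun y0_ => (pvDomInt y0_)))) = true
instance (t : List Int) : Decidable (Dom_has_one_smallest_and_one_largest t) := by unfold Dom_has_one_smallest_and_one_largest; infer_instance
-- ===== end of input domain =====

-- ===== PORT A =====
-- B is a different decomposition: separate min/max/count passes instead of A's fused single-pass state machine; on [] both Pythons raise (Pre_ excludes it).
def hoolA_stepMin (s : Int × Int) (num : Int) : Int × Int :=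
  if num < s.1 then (num, 1) else if num = s.1 then (s.1, s.2 + 1) else s

def hoolA_stepMax (s : Int × Int) (num : Int) : Int × Int :=
  if num > s.1 then (num, 1) else if num = s.1 then (s.1, s.2 + 1) else s

def has_one_smallest_and_one_largest (t : List Int) : Bool :=
  match t with
  | [] => false  -- Python A raises IndexError here; excluded by Pre_
  | t0 :: _ =>
    let s := t.foldl
      (fun (st : (Int × Int) × (Int × Int)) num => (hoolA_stepMin st.1 num, hoolA_stepMax st.2 num))
      ((t0, 0), (t0, 0))
    s.1.2 == 1 && s.2.2 == 1

-- ===== PORT B =====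
def has_one_smallest_and_one_largest_alt (t : List Int) : Bool :=
  match PySem.List.min? t (fun y => y), PySem.List.max? t (fun y => y) with
  | some mn, some mx => (PySem.List.count t mn == 1) && (PySem.List.count t mx == 1)
  | _, _ => false  -- Python B raises ValueError here; excluded by Pre_

-- ===== PRECONDITION & SPEC =====
-- Pre_ excludes only the empty list, on which A raises IndexError (t[0]) and B raises ValueError (min([])).
def Pre_has_one_smallest_and_one_largest (t : List Int) : Prop := t ≠ []
instance (t : List Int) : Decidable (Pre_has_one_smallest_and_one_largest t) := by unfold Pre_has_one_smallest_and_one_largest; infer_instance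
def pvWitness_has_one_smallest_and_one_largest : List Int := [3, 1, 2]
def Spec_has_one_smallest_and_one_largest (t : List Int) (out : Bool) : Prop := out = has_one_smallest_and_one_largest_alt t
instance (t : List Int) (out : Bool) : Decidable (Spec_has_one_smallest_and_one_largest t out) := by unfold Spec_has_one_smallest_and_one_largest; infer_instance

-- ===== CLAIM (what is proved, stated in full; the proofs are below) =====
def Claim_equal_has_one_smallest_and_one_largest : Prop := ∀ (t : List Int), Dom_has_one_smallest_and_one_largest t → Pre_has_one_smallest_and_one_largest t → Spec_has_one_smallest_and_one_largest t (has_one_smallest_and_one_largest t)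

-- ===== LEMMAS AND PROOFS =====

theorem min_foldl_le (l : List Int) (m : Int) : l.foldl min m ≤ m := by
  induction l generalizing m with
  | nil => simp
  | cons a l ih => exact le_trans (ih _) (min_le_left _ _)

theorem max_le_foldl (l : List Int) (m : Int) : m ≤ l.foldl max m := by
  induction l generalizing m with
  | nil => simp
  | cons a l ih => exact le_trans (le_max_left _ _) (ih _)

-- Invariant of A's running-min counter: the min component is the running fold, and the
-- counter ends as the count of the final minimum in the suffix, plus the incoming
-- counter when the minimum did not improve.
theorem stepMin_spec (l : List Int) (mn mc : Int) :
    l.foldl hoolA_stepMin (mn, mc)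
      = (l.foldl min mn,
         (l.count (l.foldl min mn) : Int) + (if l.foldl min mn = mn then mc else 0)) := by
  induction l generalizing mn mc with
  | nil => simp
  | cons a l ih =>
    have hF : ∀ m : Int, l.foldl min m ≤ m := fun m => min_foldl_le l m
    simp only [List.foldl_cons, List.count_cons, hoolA_stepMin, ih]
    by_cases h1 : a < mn
    · have hmin : min mn a = a := by omega
      have hne : l.foldl min a ≠ mn := by have := hF a; omega
      simp only [if_pos h1, hmin, hne, if_false]
      by_cases h : l.foldl min a = a
      · simp [h]
      · have h' : a ≠ l.foldl min a := fun e => h e.symm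
        simp [h, h']
    · by_cases h2 : a = mn
      · subst h2
        have hmin : min a a = a := by omega
        simp only [if_neg h1, if_pos rfl, hmin]
        by_cases h : l.foldl min a = a
        · simp [h]; omega
        · have h' : a ≠ l.foldl min a := fun e => h e.symm
          simp [h, h']
      · have hmin : min mn a = mn := by omega
        have hne : l.foldl min mn ≠ a := by have := hF mn; omega
        simp only [if_neg h1, if_neg h2, hmin, hne.symm, if_false]
        have hna : (a == l.foldl min mn) = false := by
          simp; exact fun e => hne e.symm
        by_cases h : l.foldl min mn = mn <;> simp [hna, h, h2]
-- Same invariant for the running-max counter.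
theorem stepMax_spec (l : List Int) (mx Mc : Int) :
    l.foldl hoolA_stepMax (mx, Mc)
      = (l.foldl max mx,
         (l.count (l.foldl max mx) : Int) + (if l.foldl max mx = mx then Mc else 0)) := by
  induction l generalizing mx Mc with
  | nil => simp
  | cons a l ih =>
    have hF : ∀ m : Int, m ≤ l.foldl max m := fun m => max_le_foldl l m
    simp only [List.foldl_cons, List.count_cons, hoolA_stepMax, ih]
    by_cases h1 : a > mx
    · have hmax : max mx a = a := by omega
      have hne : l.foldl max a ≠ mx := by have := hF a; omega
      simp only [if_pos h1, hmax, hne, if_false]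
      by_cases h : l.foldl max a = a
      · simp [h]
      · have h' : a ≠ l.foldl max a := fun e => h e.symm
        simp [h, h']
    · by_cases h2 : a = mx
      · subst h2
        have hmax : max a a = a := by omega
        simp only [if_neg h1, if_pos rfl, hmax]
        by_cases h : l.foldl max a = a
        · simp [h]; omega
        · have h' : a ≠ l.foldl max a := fun e => h e.symm
          simp [h, h']
      · have hmax : max mx a = mx := by omega
        have hne : l.foldl max mx ≠ a := by have := hF mx; omega
        simp only [if_neg h1, if_neg h2, hmax, hne.symm, if_false]
        have hna : (a == l.foldl max mx) = false := by
          simp; exact fun e => hne e.symm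
        by_cases h : l.foldl max mx = mx <;> simp [hna, h, h2]

-- ===== VERDICT (by name: the statement is the Claim_ definition above) =====
theorem has_one_smallest_and_one_largest_spec : Claim_equal_has_one_smallest_and_one_largest := by
  intro t hdom hpre
  unfold Spec_has_one_smallest_and_one_largest
  match t with
  | [] => exact absurd rfl hpre
  | t0 :: r =>
    simp only [has_one_smallest_and_one_largest, has_one_smallest_and_one_largest_alt,
      PySem.List.min?_id_cons, PySem.List.max?_id_cons, PySem.List.count_eq,
      PySem.List.foldl_prod_mk, stepMin_spec, stepMax_spec]
    simp only [List.foldl_cons, List.count_cons]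
    simp only [min_self, max_self, ite_self, add_zero]
    rw [Bool.eq_iff_iff]
    simp only [Bool.and_eq_true, beq_iff_eq]
    constructor <;> rintro ⟨u, v⟩ <;> exact ⟨by omega, by omega⟩
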